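-- pv_equiv track=rewrite | github.com/jinshim-commits/bluechickin | src/qr_scanner/qr_scanner/qr_registration.py | _extract_submission_id
-- ===== SOURCE A (Python) =====
-- def _extract_submission_id(s: str) -> str:
--     """
--     QR에 숫자만 넣는 게 정석.
--     그래도 실수로 URL 들어왔을 때, 숫자 ID만 뽑아내는 안전장치.
--     """
--     # 1) 숫자만이면 그대로
--     if s.isdigit():
--         return s
--
--     # 2) 문자열에서 "연속 숫자 덩어리" 후보 중 가장 긴 것 선택
--     digits = []
--     cur = []
--     for ch in s:
--         if ch.isdigit():
--             cur.append(ch)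
--         else:
--             if cur:
--                 digits.append("".join(cur))
--                 cur = []
--     if cur:
--         digits.append("".join(cur))
--
--     if not digits:
--         return ""
--
--     # submissionID가 보통 길어서(예: 16~20자리) 가장 긴 덩어리를 선택
--     digits.sort(key=len, reverse=True)
--     return digits[0]
-- ===== SOURCE B (Python) =====
-- def _extract_submission_id(s: str) -> str:
--     best = ""
--     cur = ""
--     for ch in s:
--         if ch.isdigit():
--             cur += ch
--         else:
--             if len(cur) > len(best):
--                 best = cur
--             cur = ""
--     if len(cur) > len(best):
--         best = cur
--     return best
-- ===== Notes on version B (the rewrite author's own statement) =====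
-- stated objective: simpler
-- what changed: Instead of collecting every digit run into a list and stable-sorting it by length (reverse) to take the head, B does a single pass that keeps only the best run so far, updating on a strict length increase so the earliest longest run still wins.
import Mathlib
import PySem

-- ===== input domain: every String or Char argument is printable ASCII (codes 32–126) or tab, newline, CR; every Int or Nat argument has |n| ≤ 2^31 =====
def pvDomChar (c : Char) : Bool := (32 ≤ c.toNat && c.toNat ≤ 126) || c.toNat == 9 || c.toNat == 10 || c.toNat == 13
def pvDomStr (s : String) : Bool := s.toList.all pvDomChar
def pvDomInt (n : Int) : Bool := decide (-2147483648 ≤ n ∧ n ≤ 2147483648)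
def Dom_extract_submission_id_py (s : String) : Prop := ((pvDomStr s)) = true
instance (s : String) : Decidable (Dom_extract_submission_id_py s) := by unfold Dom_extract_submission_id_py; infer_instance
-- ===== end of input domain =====

-- B replaces A's collect-all-runs-then-stable-sort strategy by a single pass that keeps only
-- the best run so far (strict '>' keeps the earliest longest run); objective: simpler.

-- ===== PORT A =====
-- A's loop state: (digits, cur); a non-digit flushes a nonempty cur into digits.
def pvStepA (st : List (List Char) × List Char) (ch : Char) : List (List Char) × List Char :=
  if PySem.Chars.isdigit ch then (st.1, st.2 ++ [ch])
  else if st.2 ≠ [] then (st.1 ++ [st.2], []) else st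

def extract_submission_id_py (s : String) : String :=
  if PySem.Str.strIsdigit s then s
  else
    let st := s.toList.foldl pvStepA ([], [])
    let digits := if st.2 ≠ [] then st.1 ++ [st.2] else st.1
    if digits = [] then ""
    else String.ofList ((PySem.List.sorted digits (fun d => d.length) true).headI)

-- ===== PORT B =====
-- B's loop state: (best, cur); a non-digit ends cur and keeps it only if strictly longer.
def pvStepB (st : List Char × List Char) (ch : Char) : List Char × List Char :=
  if PySem.Chars.isdigit ch then (st.1, st.2 ++ [ch])
  else (if st.2.length > st.1.length then st.2 else st.1, [])

def extract_submission_id_py_alt (s : String) : String :=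
  let st := s.toList.foldl pvStepB ([], [])
  String.ofList (if st.2.length > st.1.length then st.2 else st.1)

-- ===== PRECONDITION & SPEC =====
def Spec_extract_submission_id_py (s : String) (out : String) : Prop := out = extract_submission_id_py_alt s
instance (s : String) (out : String) : Decidable (Spec_extract_submission_id_py s out) := by unfold Spec_extract_submission_id_py; infer_instance

-- ===== CLAIM (what is proved, stated in full; the proofs are below) =====
def Claim_equal_extract_submission_id_py : Prop := ∀ (s : String), Dom_extract_submission_id_py s → Spec_extract_submission_id_py s (extract_submission_id_py s)

-- ===== LEMMAS AND PROOFS =====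

-- "best so far" update and its fold over a list of runs
def pvUpd (b d : List Char) : List Char := if d.length > b.length then d else b
def pvPick (ds : List (List Char)) : List Char := ds.foldl pvUpd []

theorem pvUpd_nil (b : List Char) : pvUpd b [] = b := by
  simp [pvUpd]

theorem pvPick_append (ds : List (List Char)) (c : List Char) :
    pvPick (ds ++ [c]) = pvUpd (pvPick ds) c := by
  simp [pvPick, List.foldl_append]

-- loop invariant: B's state tracks A's state via pvPick; A's runs stay nonempty
theorem pv_inv (l : List Char) :
    ∀ (d : List (List Char)) (c : List Char), (∀ r ∈ d, r ≠ []) →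
    (l.foldl pvStepB (pvPick d, c)).2 = (l.foldl pvStepA (d, c)).2 ∧
    (l.foldl pvStepB (pvPick d, c)).1 = pvPick (l.foldl pvStepA (d, c)).1 ∧
    (∀ r ∈ (l.foldl pvStepA (d, c)).1, r ≠ []) := by
  induction l with
  | nil => intro d c hd; exact ⟨rfl, rfl, hd⟩
  | cons ch t ih =>
    intro d c hd
    by_cases hdig : PySem.Chars.isdigit ch
    · simpa [List.foldl_cons, pvStepA, pvStepB, hdig] using ih d (c ++ [ch]) hd
    · by_cases hc : c = []
      · have := ih d [] hd
        simpa [List.foldl_cons, pvStepA, pvStepB, hdig, hc, pvUpd_nil] using this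
      · have hd' : ∀ r ∈ d ++ [c], r ≠ [] := by
          intro r hr
          rcases List.mem_append.1 hr with h | h
          · exact hd r h
          · simpa [List.mem_singleton.1 h] using hc
        have := ih (d ++ [c]) [] hd'
        simpa [List.foldl_cons, pvStepA, pvStepB, hdig, hc, pvPick_append, pvUpd] using this

-- insertBy for the reverse length order never changes anything but (possibly) the head
theorem pv_insertBy_ne_nil (bef : List Char → List Char → Bool) (x : List Char)
    (acc : List (List Char)) : PySem.List.insertBy bef x acc ≠ [] := by
  cases acc with
  | nil => simp [PySem.List.insertBy]
  | cons y ys => by_cases h : bef x y = true <;> simp [PySem.List.insertBy, h]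

theorem pv_headI_insertBy (x y : List Char) (ys : List (List Char)) :
    (PySem.List.insertBy (fun a b => decide (b.length < a.length)) x (y :: ys)).headI
      = pvUpd y x := by
  by_cases h : y.length < x.length <;> simp [PySem.List.insertBy, pvUpd, h]

theorem pv_headI_foldl_ins (t : List (List Char)) :
    ∀ (acc : List (List Char)), acc ≠ [] →
    (t.foldl (fun acc x => PySem.List.insertBy (fun a b => decide (b.length < a.length)) x acc) acc).headI
      = t.foldl pvUpd acc.headI := by
  induction t with
  | nil => intro acc _; rfl
  | cons x t ih =>
    intro acc hacc
    cases acc with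
    | nil => exact absurd rfl hacc
    | cons y ys =>
      rw [List.foldl_cons, List.foldl_cons,
        ih _ (pv_insertBy_ne_nil _ _ _)]
      congr 1
      exact pv_headI_insertBy x y ys

-- head of the reverse-stable-sorted list of nonempty runs is the first longest run
theorem pv_sorted_head (x : List Char) (t : List (List Char)) (hx : x ≠ []) :
    (PySem.List.sorted (x :: t) (fun d => d.length) true).headI = pvPick (x :: t) := by
  rw [PySem.List.sorted_rev_eq_foldl_insertBy]
  rw [List.foldl_cons]
  have h0 : PySem.List.insertBy (fun a b => decide (b.length < a.length)) x
      ([] : List (List Char)) = [x] := rfl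
  rw [h0, pv_headI_foldl_ins t [x] (by simp)]
  have : pvUpd [] x = x := by
    simp [pvUpd, List.length_pos_iff.2 hx]
  simp [pvPick, this]

-- an all-digit suffix only accumulates into cur
theorem pv_foldl_all_digits (l : List Char) :
    ∀ (b c : List Char), (∀ ch ∈ l, PySem.Chars.isdigit ch) →
    l.foldl pvStepB (b, c) = (b, c ++ l) := by
  induction l with
  | nil => intro b c _; simp
  | cons ch t ih =>
    intro b c h
    have hd : PySem.Chars.isdigit ch := h ch (List.mem_cons_self ..)
    rw [List.foldl_cons]
    simp only [pvStepB, hd, if_pos]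
    rw [ih b (c ++ [ch]) (fun x hx => h x (List.mem_cons_of_mem _ hx))]
    simp

-- ===== VERDICT (by name: the statement is the Claim_ definition above) =====
theorem extract_submission_id_py_spec : Claim_equal_extract_submission_id_py := by
  intro s _
  unfold Spec_extract_submission_id_py
  unfold extract_submission_id_py extract_submission_id_py_alt
  by_cases hdig : PySem.Str.strIsdigit s
  · -- all-digit, nonempty: B also returns s
    rw [if_pos hdig]
    rw [PySem.Str.strIsdigit_eq] at hdig
    simp only [PySem.Chars.strIsdigit, Bool.and_eq_true, Bool.not_eq_true',
      List.isEmpty_eq_false_iff, List.all_eq_true] at hdig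
    obtain ⟨hne, hall⟩ := hdig
    rw [pv_foldl_all_digits s.toList [] [] (fun ch hc => hall ch hc)]
    have hlen : 0 < s.length := by
      rw [← String.length_toList]; exact List.length_pos_iff.2 hne
    simp [hlen]
  · rw [if_neg hdig]
    dsimp only
    obtain ⟨h2, h1, hruns⟩ := pv_inv s.toList [] [] (by simp)
    have hpick0 : pvPick [] = [] := rfl
    rw [hpick0] at h2 h1
    set stA := s.toList.foldl pvStepA ([], []) with hstA
    set stB := s.toList.foldl pvStepB ([], []) with hstB
    -- B's final value is pvPick of A's final digits list
    have hB : (if stB.2.length > stB.1.length then stB.2 else stB.1)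
        = pvPick (if stA.2 ≠ [] then stA.1 ++ [stA.2] else stA.1) := by
      rw [h1, h2]
      by_cases hc : stA.2 = []
      · simp [hc]
      · rw [if_pos hc, pvPick_append]
        rfl
    rw [hB]
    by_cases hd : (if stA.2 ≠ [] then stA.1 ++ [stA.2] else stA.1) = []
    · rw [if_pos hd, hd]
      rfl
    · rw [if_neg hd]
      set digits := if stA.2 ≠ [] then stA.1 ++ [stA.2] else stA.1 with hdigs
      have hne' : ∀ r ∈ digits, r ≠ [] := by
        intro r hr
        rw [hdigs] at hr
        by_cases hc : stA.2 = []
        · exact hruns r (by simpa [hc] using hr)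
        · rw [if_pos hc] at hr
          rcases List.mem_append.1 hr with h | h
          · exact hruns r h
          · simpa [List.mem_singleton.1 h] using hc
      obtain ⟨x, t, hxt⟩ := List.exists_cons_of_ne_nil hd
      rw [hxt, pv_sorted_head x t (hne' x (hxt ▸ List.mem_cons_self ..))]
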